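-- pv_equiv track=rewrite | github.com/blackviking27/DSA-450-Python | stacks_and_queues/34.py | SumOfKsubArray
-- ===== SOURCE A (Python) =====
-- from collections import deque
--
-- def SumOfKsubArray(arr, n, k):
--     # greating 2 doubly ended queue
--     s = deque()  # stores the element which are minimum for the window
--     g = deque()  # stores the element which are maximum for the window
--
--     # for first window
--     for i in range(k):
--         # removing the useless elements from both deques
--         while len(s) > 0 and arr[i] <= arr[s[-1]]:
--             s.pop()
--
--         while len(g) > 0 and arr[i] >= arr[g[-1]]:
--             g.pop()
--
--         # appending the current element
--         s.append(i)
--         g.append(i)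
--
--     max_sum = 0  # stores the sum of min and max of a window
--
--     # for the remaining windows
--     for i in range(k, n):
--         # calculating sum
--         max_sum += arr[g[0]] + arr[s[0]]
--
--         # removing elements which are not in the current window
--         while len(s) > 0 and s[0] <= i - k:
--             s.popleft()
--
--         while len(g) > 0 and g[0] <= i - k:
--             g.popleft()
--
--         # removing the useless elements from the deques
--         while len(s) > 0 and arr[i] <= arr[s[-1]]:
--             s.pop()
--
--         while len(g) > 0 and arr[i] >= arr[g[-1]]:
--             g.pop()
--
--         # appending the current element
--         s.append(i)
--         g.append(i)
--
--     # for the last window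
--     max_sum += arr[s[0]] + arr[g[0]]
--     return max_sum
-- ===== SOURCE B (Python) =====
-- def SumOfKsubArray(arr, n, k):
--     # Sum min+max of each k-window by direct scan of the window slice.
--     # Windows start at 0..n-k; the first window is always counted (as in the
--     # original, whose final-window addition runs even when n <= k).
--     total = 0
--     for i in range(max(n - k + 1, 1)):
--         w = arr[i:i + k]
--         total += min(w) + max(w)
--     return total
-- ===== Notes on version B (the rewrite author's own statement) =====
-- stated objective: simpler
-- what changed: Replaces the two monotonic index deques (amortized pop/push maintenance of window minima and maxima) with a direct per-window slice scanned by min()/max(), summing over the max(n-k+1,1) window start positions.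
import Mathlib
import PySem

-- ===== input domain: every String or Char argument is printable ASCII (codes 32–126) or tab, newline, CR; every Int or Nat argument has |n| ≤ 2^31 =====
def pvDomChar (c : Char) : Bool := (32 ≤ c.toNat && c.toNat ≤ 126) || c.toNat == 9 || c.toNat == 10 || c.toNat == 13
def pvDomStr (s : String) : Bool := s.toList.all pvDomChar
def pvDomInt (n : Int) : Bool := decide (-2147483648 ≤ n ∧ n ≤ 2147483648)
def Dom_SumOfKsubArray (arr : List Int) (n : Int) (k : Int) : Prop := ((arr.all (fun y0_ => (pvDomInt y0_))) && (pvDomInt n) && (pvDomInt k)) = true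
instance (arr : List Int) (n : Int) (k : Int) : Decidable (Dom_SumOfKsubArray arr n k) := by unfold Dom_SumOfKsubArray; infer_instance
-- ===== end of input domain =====

-- B replaces A's two monotonic index deques by a direct min()/max() scan of each window slice (simpler, not faster).

-- ===== PORT A =====
-- The deques s and g are stored back-to-front (head = Python's s[-1]):
-- append → cons, the pop-from-the-right while loops → dropWhile at the head,
-- s[0]/popleft act on the reversed list.  arr[x] → pvAt (exact under Pre_:
-- every index reached is then in range; Python raises IndexError exactly
-- where pyGet? is none), deque[0] of an empty deque (Python IndexError,
-- only reachable outside Pre_) → default 0.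
def pvAt (arr : List Int) (i : Int) : Int := (PySem.List.pyGet? arr i).getD 0

-- s[0] of a back-to-front deque
def pvFront (d : List Int) : Int := d.getLast?.getD 0

-- body of the first loop (also the tail of the second loop's body: prune both deques, append i)
def pvStep1 (arr : List Int) (sg : List Int × List Int) (i : Int) : List Int × List Int :=
  let ai := pvAt arr i
  (i :: sg.1.dropWhile (fun j => decide (ai ≤ pvAt arr j)),
   i :: sg.2.dropWhile (fun j => decide (ai ≥ pvAt arr j)))

-- body of the second loop: add arr[g[0]] + arr[s[0]], popleft stale indices, prune, append i
def pvStep2 (arr : List Int) (k : Int) (st : (List Int × List Int) × Int) (i : Int) : (List Int × List Int) × Int :=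
  let m := st.2 + pvAt arr (pvFront st.1.2) + pvAt arr (pvFront st.1.1)
  let s1 := (st.1.1.reverse.dropWhile (fun j => decide (j ≤ i - k))).reverse
  let g1 := (st.1.2.reverse.dropWhile (fun j => decide (j ≤ i - k))).reverse
  (pvStep1 arr (s1, g1) i, m)

def SumOfKsubArray (arr : List Int) (n : Int) (k : Int) : Int :=
  let sg := (PySem.List.pyRange 0 k 1).foldl (pvStep1 arr) ([], [])
  let st := (PySem.List.pyRange k n 1).foldl (pvStep2 arr k) (sg, 0)
  st.2 + pvAt arr (pvFront st.1.1) + pvAt arr (pvFront st.1.2)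

-- ===== PORT B =====
def SumOfKsubArray_alt (arr : List Int) (n : Int) (k : Int) : Int :=
  (PySem.List.pyRange 0 (max (n - k + 1) 1) 1).foldl (fun total i =>
    let w := PySem.List.slice arr (some i) (some (i + k))
    total + (PySem.List.min? w (fun x => x)).getD 0 + (PySem.List.max? w (fun x => x)).getD 0) 0

-- ===== PRECONDITION & SPEC =====
-- Exactly the inputs on which the Python A returns normally: it raises
-- IndexError as soon as k < 1, k > len(arr) or n > len(arr).
def Pre_SumOfKsubArray (arr : List Int) (n : Int) (k : Int) : Prop :=
  1 ≤ k ∧ k ≤ (arr.length : Int) ∧ n ≤ (arr.length : Int)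
instance (arr : List Int) (n : Int) (k : Int) : Decidable (Pre_SumOfKsubArray arr n k) := by unfold Pre_SumOfKsubArray; infer_instance

def pvWitness_SumOfKsubArray : List Int × Int × Int := ([1, 3, -2, 5], 4, 2)

def Spec_SumOfKsubArray (arr : List Int) (n : Int) (k : Int) (out : Int) : Prop := out = SumOfKsubArray_alt arr n k
instance (arr : List Int) (n : Int) (k : Int) (out : Int) : Decidable (Spec_SumOfKsubArray arr n k out) := by unfold Spec_SumOfKsubArray; infer_instance

-- ===== CLAIM (what is proved, stated in full; the proofs are below) =====
def Claim_equal_SumOfKsubArray : Prop := ∀ (arr : List Int) (n : Int) (k : Int), Dom_SumOfKsubArray arr n k → Pre_SumOfKsubArray arr n k → Spec_SumOfKsubArray arr n k (SumOfKsubArray arr n k)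

-- ===== LEMMAS AND PROOFS =====

-- j is still a useful index for the window ending at m: every later element (up to m) beats it
def pvCand (c : Int → Int → Bool) (f : Int → Int) (m j : Int) : Bool :=
  (PySem.List.pyRange (j + 1) (m + 1) 1).all (fun j' => c (f j) (f j'))

-- the canonical content of a monotonic deque for the window [lo, m], front first
def pvCands (c : Int → Int → Bool) (f : Int → Int) (lo m : Int) : List Int :=
  (PySem.List.pyRange lo (m + 1) 1).filter (pvCand c f m)

def pvLt (x y : Int) : Bool := decide (x < y)
def pvGt (x y : Int) : Bool := decide (y < x)

-- min + max of the window starting at j, read off the two canonical deques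
def pvW (arr : List Int) (k j : Int) : Int :=
  pvAt arr ((pvCands pvLt (pvAt arr) j (j + k - 1)).head?.getD 0)
  + pvAt arr ((pvCands pvGt (pvAt arr) j (j + k - 1)).head?.getD 0)

lemma pvLt_asymm : ∀ x y : Int, pvLt x y = true → pvLt y x = false := by
  intro x y h; simp [pvLt] at *; omega
lemma pvLt_mix : ∀ u v x : Int, pvLt u x = true → pvLt v x = false → pvLt u v = true := by
  intro u v x h1 h2; simp [pvLt] at *; omega
lemma pvLt_trans : ∀ x y z : Int, pvLt x y = true → pvLt y z = true → pvLt x z = true := by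
  intro x y z h1 h2; simp [pvLt] at *; omega
lemma pvGt_asymm : ∀ x y : Int, pvGt x y = true → pvGt y x = false := by
  intro x y h; simp [pvGt] at *; omega
lemma pvGt_mix : ∀ u v x : Int, pvGt u x = true → pvGt v x = false → pvGt u v = true := by
  intro u v x h1 h2; simp [pvGt] at *; omega
lemma pvGt_trans : ∀ x y z : Int, pvGt x y = true → pvGt y z = true → pvGt x z = true := by
  intro x y z h1 h2; simp [pvGt] at *; omega

lemma pvCands_nil (c : Int → Int → Bool) (f : Int → Int) (lo m : Int) (h : m + 1 ≤ lo) :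
    pvCands c f lo m = [] := by
  unfold pvCands
  rw [PySem.List.pyRange_one_eq_nil h]
  rfl

lemma pvCands_step (c : Int → Int → Bool) (f : Int → Int) (lo m : Int) (h : lo ≤ m) :
    pvCands c f lo m = (pvCands c f lo (m - 1)).filter (fun j => c (f j) (f m)) ++ [m] := by
  unfold pvCands
  have h1 : PySem.List.pyRange lo (m + 1) 1 = PySem.List.pyRange lo m 1 ++ [m] := by
    have := PySem.List.pyRange_one_succ_right (a := lo) (b := m) h
    simpa using this
  have hm : m - 1 + 1 = m := by omega
  rw [h1, List.filter_append, hm, List.filter_filter]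
  congr 1
  · apply List.filter_congr
    intro j hj
    have hj' := (PySem.List.mem_pyRange_one).1 hj
    unfold pvCand
    have h2 : PySem.List.pyRange (j + 1) (m + 1) 1 = PySem.List.pyRange (j + 1) m 1 ++ [m] := by
      have := PySem.List.pyRange_one_succ_right (a := j + 1) (b := m) (by omega)
      simpa using this
    rw [h2, List.all_append]
    simp [Bool.and_comm]
  · unfold pvCand
    simp [PySem.List.pyRange_one_eq_nil (le_refl (m + 1))]

lemma pvCands_pairwise (c : Int → Int → Bool) (f : Int → Int) (lo m : Int) :
    (pvCands c f lo m).Pairwise (fun x y => c (f x) (f y) = true) := by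
  have hlt : (pvCands c f lo m).Pairwise (· < ·) :=
    (PySem.List.pairwise_lt_pyRange_one (a := lo) (b := m + 1)).filter _
  refine hlt.imp_of_mem ?_
  intro x y hx hy hxy
  have hxm := List.mem_filter.1 hx
  have hym := List.mem_filter.1 hy
  have hxr := (PySem.List.mem_pyRange_one).1 hxm.1
  have hyr := (PySem.List.mem_pyRange_one).1 hym.1
  have hcand := hxm.2
  unfold pvCand at hcand
  have := (List.all_eq_true.1 hcand) y ((PySem.List.mem_pyRange_one).2 ⟨by omega, by omega⟩)
  simpa using this

lemma pvCands_head (c : Int → Int → Bool) (f : Int → Int)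
    (Hasymm : ∀ x y, c x y = true → c y x = false)
    (Hmix : ∀ u v x, c u x = true → c v x = false → c u v = true)
    (lo m : Int) (h : lo ≤ m) :
    ∃ j0 t, pvCands c f lo m = j0 :: t ∧ lo ≤ j0 ∧ j0 ≤ m ∧
      ∀ j, lo ≤ j → j ≤ m → c (f j) (f j0) = false := by
  have hirr : ∀ x, c x x = false := by
    intro x
    cases hcx : c x x with
    | false => rfl
    | true => have := Hasymm x x hcx; simp [hcx] at this
  have key : ∀ (d : Nat) (m : Int), m = lo + d →
      ∃ j0 t, pvCands c f lo m = j0 :: t ∧ lo ≤ j0 ∧ j0 ≤ m ∧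
        ∀ j, lo ≤ j → j ≤ m → c (f j) (f j0) = false := by
    intro d
    induction d with
    | zero =>
      intro m hm
      refine ⟨lo, [], ?_, le_refl _, by omega, ?_⟩
      · unfold pvCands pvCand
        rw [hm]
        simp [PySem.List.pyRange_one_singleton, PySem.List.pyRange_one_eq_nil (le_refl (lo + 1))]
      · intro j hj1 hj2
        have : j = lo := by omega
        subst this; exact hirr _
    | succ d ih =>
      intro m hm
      obtain ⟨j0, t, hc, hlo0, hhi0, hext⟩ := ih (m - 1) (by omega)
      have hstep := pvCands_step c f lo m (by omega)
      by_cases hp : c (f j0) (f m) = true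
      · refine ⟨j0, t.filter (fun j => c (f j) (f m)) ++ [m], ?_, hlo0, by omega, ?_⟩
        · rw [hstep, hc]
          simp [hp]
        · intro j hj1 hj2
          rcases lt_or_ge j m with hlt | hge
          · exact hext j hj1 (by omega)
          · have : j = m := by omega
            subst this
            exact Hasymm _ _ hp
      · have hp' : c (f j0) (f m) = false := by simpa using hp
        have hkill : (pvCands c f lo (m - 1)).filter (fun j => c (f j) (f m)) = [] := by
          apply List.filter_eq_nil_iff.2
          intro x hx
          have hxr := (PySem.List.mem_pyRange_one).1 (List.mem_filter.1 hx).1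
          intro hcx
          have := Hmix _ _ _ hcx hp'
          have h2 := hext x (by omega) (by omega)
          simp [this] at h2
        refine ⟨m, [], ?_, by omega, le_refl _, ?_⟩
        · rw [hstep, hkill]; rfl
        · intro j hj1 hj2
          rcases lt_or_ge j m with hlt | hge
          · by_cases hcj : c (f j) (f m) = true
            · have := Hmix _ _ _ hcj hp'
              have h2 := hext j (by omega) (by omega)
              simp [this] at h2
            · simpa using hcj
          · have : j = m := by omega
            subst this
            exact hirr _
  obtain ⟨j0, t, hh⟩ := key (m - lo).toNat m (by omega)
  exact ⟨j0, t, hh⟩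

lemma pvCands_dropWhile (c : Int → Int → Bool) (f : Int → Int) (lo m lim : Int)
    (h1 : lo ≤ lim + 1) (h2 : lim + 1 ≤ m + 1) :
    (pvCands c f lo m).dropWhile (fun j => decide (j ≤ lim)) = pvCands c f (lim + 1) m := by
  unfold pvCands
  rw [PySem.List.pyRange_one_append lo (lim + 1) (m + 1) h1 h2, List.filter_append,
      List.dropWhile_append]
  have hall : ((PySem.List.pyRange lo (lim + 1) 1).filter (pvCand c f m)).dropWhile
      (fun j => decide (j ≤ lim)) = [] := by
    rw [List.dropWhile_eq_nil_iff]
    intro x hx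
    have := (PySem.List.mem_pyRange_one).1 (List.mem_filter.1 hx).1
    simp; omega
  rw [hall]
  simp only [List.isEmpty_nil, if_true]
  cases hl : (PySem.List.pyRange (lim + 1) (m + 1) 1).filter (pvCand c f m) with
  | nil => simp
  | cons a t =>
    have ha : a ∈ (PySem.List.pyRange (lim + 1) (m + 1) 1).filter (pvCand c f m) := by
      rw [hl]; exact List.mem_cons_self
    have := (PySem.List.mem_pyRange_one).1 (List.mem_filter.1 ha).1
    rw [List.dropWhile_cons_of_neg (by simp; omega)]

lemma pvDropRevAux (p : Int → Bool) :
    ∀ (r : List Int), r.Pairwise (fun x y => p x = true → p y = true) →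
      r.dropWhile (fun x => !p x) = (r.reverse.filter p).reverse := by
  intro r
  induction r with
  | nil => intro _; simp
  | cons x r ih =>
    intro hp
    rw [List.pairwise_cons] at hp
    by_cases hpx : p x = true
    · have hall : r.reverse.filter p = r.reverse := by
        apply List.filter_eq_self.2
        intro y hy
        exact hp.1 y (List.mem_reverse.1 hy) hpx
      rw [List.dropWhile_cons_of_neg (by simp [hpx])]
      simp [List.filter_append, hall, hpx]
    · rw [List.dropWhile_cons_of_pos (by simp [hpx])]
      simp only [List.reverse_cons, List.filter_append]
      rw [ih hp.2]
      simp [hpx]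

lemma pvDropRev (p : Int → Bool) (l : List Int)
    (h : l.Pairwise (fun x y => p y = true → p x = true)) :
    l.reverse.dropWhile (fun x => !p x) = (l.filter p).reverse := by
  have := pvDropRevAux p l.reverse (List.pairwise_reverse.mpr h)
  simpa using this

lemma pvCands_push (c : Int → Int → Bool) (f : Int → Int)
    (Htrans : ∀ x y z, c x y = true → c y z = true → c x z = true)
    (lo m : Int) (h : lo ≤ m) (q : Int → Bool) (hq : ∀ j, q j = !c (f j) (f m)) :
    m :: (pvCands c f lo (m - 1)).reverse.dropWhile q = (pvCands c f lo m).reverse := by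
  have hqe : q = fun j => !(fun j => c (f j) (f m)) j := funext hq
  have hpair : (pvCands c f lo (m - 1)).Pairwise
      (fun x y => (fun j => c (f j) (f m)) y = true → (fun j => c (f j) (f m)) x = true) := by
    refine (pvCands_pairwise c f lo (m - 1)).imp_of_mem ?_
    intro x y hx hy hxy
    exact fun hy2 => Htrans _ _ _ hxy hy2
  rw [hqe, pvDropRev _ _ hpair, pvCands_step c f lo m h, List.reverse_append]
  simp

lemma pvStep1_eq (arr : List Int) (lo i : Int) (h : lo ≤ i) :
    pvStep1 arr ((pvCands pvLt (pvAt arr) lo (i - 1)).reverse,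
                 (pvCands pvGt (pvAt arr) lo (i - 1)).reverse) i
    = ((pvCands pvLt (pvAt arr) lo i).reverse, (pvCands pvGt (pvAt arr) lo i).reverse) := by
  unfold pvStep1
  simp only
  rw [pvCands_push pvLt (pvAt arr) pvLt_trans lo i h _
        (by intro j; simp only [pvLt]; rw [← decide_not]; exact decide_eq_decide.mpr (by omega) : _),
      pvCands_push pvGt (pvAt arr) pvGt_trans lo i h _
        (by intro j; simp only [pvGt]; rw [← decide_not]; exact decide_eq_decide.mpr (by omega) : _)]

lemma pvLoop1 (arr : List Int) :
    ∀ (d : Nat) (u v : Int), v = u + d → 0 ≤ u →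
      (PySem.List.pyRange u v 1).foldl (pvStep1 arr)
        ((pvCands pvLt (pvAt arr) 0 (u - 1)).reverse, (pvCands pvGt (pvAt arr) 0 (u - 1)).reverse)
      = ((pvCands pvLt (pvAt arr) 0 (v - 1)).reverse, (pvCands pvGt (pvAt arr) 0 (v - 1)).reverse) := by
  intro d
  induction d with
  | zero =>
    intro u v hv hu
    rw [PySem.List.pyRange_one_eq_nil (by omega)]
    simp only [List.foldl_nil]
    have : u = v := by omega
    subst this; rfl
  | succ d ih =>
    intro u v hv hu
    rw [PySem.List.pyRange_one_cons (by omega), List.foldl_cons, pvStep1_eq arr 0 u hu]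
    have h1 : u + 1 - 1 = u := by omega
    have := ih (u + 1) v (by omega) (by omega)
    rw [h1] at this
    exact this

lemma pvStep2_eq (arr : List Int) (k i acc : Int) (hk : 1 ≤ k) (_hi : k ≤ i) :
    pvStep2 arr k (((pvCands pvLt (pvAt arr) (i - k) (i - 1)).reverse,
                    (pvCands pvGt (pvAt arr) (i - k) (i - 1)).reverse), acc) i
    = (((pvCands pvLt (pvAt arr) (i - k + 1) i).reverse,
        (pvCands pvGt (pvAt arr) (i - k + 1) i).reverse), acc + pvW arr k (i - k)) := by
  unfold pvStep2
  simp only [List.reverse_reverse]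
  rw [pvCands_dropWhile pvLt (pvAt arr) (i - k) (i - 1) (i - k) (by omega) (by omega),
      pvCands_dropWhile pvGt (pvAt arr) (i - k) (i - 1) (i - k) (by omega) (by omega),
      pvStep1_eq arr (i - k + 1) i (by omega)]
  have h3 : i - k + k - 1 = i - 1 := by omega
  unfold pvFront pvW
  rw [List.getLast?_reverse, List.getLast?_reverse, h3]
  congr 1
  ring

lemma pvLoop2 (arr : List Int) (k n : Int) (hk : 1 ≤ k) :
    ∀ (d : Nat) (i acc : Int), n = i + d → k ≤ i →
      (let st := (PySem.List.pyRange i n 1).foldl (pvStep2 arr k)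
        (((pvCands pvLt (pvAt arr) (i - k) (i - 1)).reverse,
          (pvCands pvGt (pvAt arr) (i - k) (i - 1)).reverse), acc);
       st.2 + pvAt arr (pvFront st.1.1) + pvAt arr (pvFront st.1.2))
      = acc + ((PySem.List.pyRange (i - k) (n - k + 1) 1).map (pvW arr k)).sum := by
  intro d
  induction d with
  | zero =>
    intro i acc hn _hi
    have hin : i = n := by omega
    subst hin
    rw [PySem.List.pyRange_one_eq_nil (le_refl i)]
    simp only [List.foldl_nil]
    have hr : PySem.List.pyRange (i - k) (i - k + 1) 1 = [i - k] :=
      PySem.List.pyRange_one_singleton _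
    rw [hr]
    unfold pvFront pvW
    simp only [List.getLast?_reverse, List.map_cons, List.map_nil, List.sum_cons,
      List.sum_nil]
    have h3 : i - k + k - 1 = i - 1 := by omega
    rw [h3]
    ring
  | succ d ih =>
    intro i acc hn hi
    rw [PySem.List.pyRange_one_cons (by omega), List.foldl_cons,
        pvStep2_eq arr k i acc hk hi]
    have h1 : i + 1 - k = i - k + 1 := by omega
    have h2 : i + 1 - 1 = i := by omega
    have := ih (i + 1) (acc + pvW arr k (i - k)) (by omega) (by omega)
    rw [h1, h2] at this
    rw [this]
    rw [PySem.List.pyRange_one_cons (show i - k < n - k + 1 by omega)]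
    simp [add_assoc]

lemma pvA_eq_sum (arr : List Int) (n k : Int) (hk : 1 ≤ k) :
    SumOfKsubArray arr n k
      = ((PySem.List.pyRange 0 (max (n - k + 1) 1) 1).map (pvW arr k)).sum := by
  unfold SumOfKsubArray
  have hinit : (([], []) : List Int × List Int)
      = ((pvCands pvLt (pvAt arr) 0 (0 - 1)).reverse, (pvCands pvGt (pvAt arr) 0 (0 - 1)).reverse) := by
    rw [pvCands_nil pvLt (pvAt arr) 0 (0 - 1) (by omega),
        pvCands_nil pvGt (pvAt arr) 0 (0 - 1) (by omega)]
    rfl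
  rw [hinit, pvLoop1 arr k.toNat 0 k (by omega) (le_refl 0)]
  rcases le_or_gt k n with hkn | hnk
  · have hkk : k - k = 0 := by omega
    have := pvLoop2 arr k n hk (n - k).toNat k 0 (by omega) (le_refl k)
    rw [hkk] at this
    simp only at this ⊢
    rw [this, zero_add]
    have hmax : max (n - k + 1) 1 = n - k + 1 := by omega
    rw [hmax]
  · rw [PySem.List.pyRange_one_eq_nil (by omega : n ≤ k)]
    simp only [List.foldl_nil]
    have hmax : max (n - k + 1) 1 = 1 := by omega
    rw [hmax]
    have hr : PySem.List.pyRange 0 1 1 = [0] := by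
      have := PySem.List.pyRange_one_singleton (a := (0 : Int))
      simpa using this
    rw [hr]
    unfold pvFront pvW
    simp only [List.getLast?_reverse, List.map_cons, List.map_nil, List.sum_cons, List.sum_nil]
    have h1 : (0 : Int) + k - 1 = k - 1 := by omega
    rw [h1]
    ring

lemma pvAt_eq (arr : List Int) (j : Int) (h0 : 0 ≤ j) (hl : j < (arr.length : Int)) :
    pvAt arr j = arr[j.toNat]'(by omega) := by
  unfold pvAt
  rw [PySem.List.pyGet?_eq_some_getElem arr h0 hl]
  rfl

lemma pvW_eq (arr : List Int) (k j : Int) (h0 : 0 ≤ j) (hk : 1 ≤ k)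
    (hjk : j + k ≤ (arr.length : Int)) :
    pvW arr k j
      = (PySem.List.min? (PySem.List.slice arr (some j) (some (j + k))) (fun x => x)).getD 0
        + (PySem.List.max? (PySem.List.slice arr (some j) (some (j + k))) (fun x => x)).getD 0 := by
  have hw : PySem.List.slice arr (some j) (some (j + k))
      = (arr.drop j.toNat).take ((j + k).toNat - j.toNat) :=
    PySem.List.slice_toNat arr h0 (by omega)
  set d := j.toNat with hd
  set t := (j + k).toNat - j.toNat with ht
  have htk : (t : Int) = k := by omega
  have hlen : (PySem.List.slice arr (some j) (some (j + k))).length = t := by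
    rw [hw]; simp; omega
  have hmemc : ∀ y ∈ PySem.List.slice arr (some j) (some (j + k)),
      ∃ (u : Nat) (hu : u < t) (hdu : d + u < arr.length), arr[d + u]'hdu = y := by
    intro y hy
    rw [hw] at hy
    obtain ⟨u, hu, hyu⟩ := List.getElem_of_mem hy
    have hu2 : u < min t (arr.length - d) := by simpa using hu
    refine ⟨u, by omega, by omega, ?_⟩
    rw [← hyu, List.getElem_take, List.getElem_drop]
  have hmemi : ∀ (j0 : Int) (hj1 : j ≤ j0) (hj2 : j0 ≤ j + k - 1),
      arr[j0.toNat]'(by omega) ∈ PySem.List.slice arr (some j) (some (j + k)) := by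
    intro j0 hj1 hj2
    rw [hw]
    have hu : j0.toNat - d < (List.take t (arr.drop d)).length := by
      rw [← hw, hlen]; omega
    have : (List.take t (arr.drop d))[j0.toNat - d]'hu = arr[j0.toNat]'(by omega) := by
      rw [List.getElem_take, List.getElem_drop]
      congr 1; omega
    rw [← this]
    exact List.getElem_mem hu
  obtain ⟨j0, t0, hc0, hj0a, hj0b, hext0⟩ :=
    pvCands_head pvLt (pvAt arr) pvLt_asymm pvLt_mix j (j + k - 1) (by omega)
  obtain ⟨j1, t1, hc1, hj1a, hj1b, hext1⟩ :=
    pvCands_head pvGt (pvAt arr) pvGt_asymm pvGt_mix j (j + k - 1) (by omega)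
  have hne : PySem.List.slice arr (some j) (some (j + k)) ≠ [] := by
    intro hnil; rw [hnil] at hlen; simp at hlen; omega
  obtain ⟨vmin, hvmin⟩ : ∃ v, PySem.List.min? (PySem.List.slice arr (some j) (some (j + k))) (fun x => x) = some v := by
    cases hm : PySem.List.min? (PySem.List.slice arr (some j) (some (j + k))) (fun x => x) with
    | none => exact absurd ((PySem.List.min?_eq_none_iff _ _).1 hm) hne
    | some v => exact ⟨v, rfl⟩
  obtain ⟨vmax, hvmax⟩ : ∃ v, PySem.List.max? (PySem.List.slice arr (some j) (some (j + k))) (fun x => x) = some v := by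
    cases hm : PySem.List.max? (PySem.List.slice arr (some j) (some (j + k))) (fun x => x) with
    | none => exact absurd ((PySem.List.max?_eq_none_iff _ _).1 hm) hne
    | some v => exact ⟨v, rfl⟩
  have hf0 : pvAt arr j0 = arr[j0.toNat]'(by omega) := pvAt_eq arr j0 (by omega) (by omega)
  have hf1 : pvAt arr j1 = arr[j1.toNat]'(by omega) := pvAt_eq arr j1 (by omega) (by omega)
  have hmin : pvAt arr j0 = vmin := by
    have h1 : vmin ≤ pvAt arr j0 := by
      rw [hf0]; exact PySem.List.min?_isMin hvmin _ (hmemi j0 hj0a hj0b)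
    have h2 : pvAt arr j0 ≤ vmin := by
      obtain ⟨u, hu, hdu, hy⟩ := hmemc vmin (PySem.List.min?_mem hvmin)
      have hax : pvAt arr ((d + u : Nat) : Int) = arr[d + u]'hdu := by
        rw [pvAt_eq arr _ (by omega) (by omega)]
        norm_cast
      have he := hext0 ((d + u : Nat) : Int) (by omega) (by omega)
      rw [pvLt, hax, hy] at he
      simpa using he
    exact le_antisymm h2 h1
  have hmax : pvAt arr j1 = vmax := by
    have h1 : pvAt arr j1 ≤ vmax := by
      rw [hf1]; exact PySem.List.max?_isMax hvmax _ (hmemi j1 hj1a hj1b)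
    have h2 : vmax ≤ pvAt arr j1 := by
      obtain ⟨u, hu, hdu, hy⟩ := hmemc vmax (PySem.List.max?_mem hvmax)
      have hax : pvAt arr ((d + u : Nat) : Int) = arr[d + u]'hdu := by
        rw [pvAt_eq arr _ (by omega) (by omega)]
        norm_cast
      have he := hext1 ((d + u : Nat) : Int) (by omega) (by omega)
      rw [pvGt, hax, hy] at he
      simpa using he
    exact le_antisymm h1 h2
  unfold pvW
  rw [hc0, hc1, hvmin, hvmax]
  simp [hmin, hmax]

lemma pvB_eq_sum (arr : List Int) (n k : Int) :
    SumOfKsubArray_alt arr n k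
      = ((PySem.List.pyRange 0 (max (n - k + 1) 1) 1).map (fun i =>
          (PySem.List.min? (PySem.List.slice arr (some i) (some (i + k))) (fun x => x)).getD 0
          + (PySem.List.max? (PySem.List.slice arr (some i) (some (i + k))) (fun x => x)).getD 0)).sum := by
  unfold SumOfKsubArray_alt
  have hfun : (fun (total : Int) (i : Int) =>
      let w := PySem.List.slice arr (some i) (some (i + k))
      total + (PySem.List.min? w (fun x => x)).getD 0 + (PySem.List.max? w (fun x => x)).getD 0)
      = fun (total : Int) (i : Int) => total +
          ((PySem.List.min? (PySem.List.slice arr (some i) (some (i + k))) (fun x => x)).getD 0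
           + (PySem.List.max? (PySem.List.slice arr (some i) (some (i + k))) (fun x => x)).getD 0) := by
    funext total i
    simp [add_assoc]
  rw [hfun, PySem.List.foldl_add, zero_add]

-- ===== VERDICT (by name: the statement is the Claim_ definition above) =====
theorem SumOfKsubArray_spec : Claim_equal_SumOfKsubArray := by
  intro arr n k _hdom hpre
  obtain ⟨hk, hkl, hnl⟩ := hpre
  unfold Spec_SumOfKsubArray
  rw [pvA_eq_sum arr n k hk, pvB_eq_sum arr n k]
  apply congrArg
  apply List.map_congr_left
  intro i hi
  have hi' := (PySem.List.mem_pyRange_one).1 hi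
  have hik : i + k ≤ (arr.length : Int) := by
    rcases max_cases (n - k + 1) 1 with ⟨he, _⟩ | ⟨he, _⟩ <;> omega
  exact pvW_eq arr k i hi'.1 hk hik
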